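-- pv_equiv track=rewrite | github.com/Rowusuduah/BuildWorld | products/livelock-probe/livelock_probe/engine.py | _find_stuck_window
-- ===== SOURCE A (Python) =====
-- from typing import Callable, List, Optional, Tuple
--
-- def _find_stuck_window(
--     stuck_mask: List[bool],
-- ) -> Tuple[Optional[int], Optional[int]]:
--     """
--     Find the start and end indices of the longest consecutive stuck window.
--
--     Returns:
--         (start, end) tuple where both are inclusive step indices,
--         or (None, None) if no stuck window exists.
--     """
--     best_start: Optional[int] = None
--     best_end: Optional[int] = None
--     best_len = 0
--
--     current_start: Optional[int] = None
--     current_len = 0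
--
--     for i, val in enumerate(stuck_mask):
--         if val:
--             if current_start is None:
--                 current_start = i
--             current_len += 1
--             if current_len > best_len:
--                 best_len = current_len
--                 best_start = current_start
--                 best_end = i
--         else:
--             current_start = None
--             current_len = 0
--
--     return best_start, best_end
-- ===== SOURCE B (Python) =====
-- def _find_stuck_window(stuck_mask):
--     # Phase 1: collect all maximal consecutive-True runs as inclusive (start, end).
--     runs = []
--     start = None
--     for i, val in enumerate(stuck_mask):
--         if val:
--             if start is None:
--                 start = i
--         else:
--             if start is not None:
--                 runs.append((start, i - 1))
--                 start = None
--     if start is not None: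
--         runs.append((start, len(stuck_mask) - 1))
--     # Phase 2: pick the first longest run (max returns the first maximum).
--     if not runs:
--         return (None, None)
--     s, e = max(runs, key=lambda r: r[1] - r[0])
--     return (s, e)
-- ===== Notes on version B (the rewrite author's own statement) =====
-- stated objective: alternative
-- what changed: B splits the task into two phases: first collect every maximal consecutive-True run as an inclusive (start,end) pair, then select the first longest run with max(key=length), instead of A's single scan that interleaves run tracking with best-so-far bookkeeping.
import Mathlib
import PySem

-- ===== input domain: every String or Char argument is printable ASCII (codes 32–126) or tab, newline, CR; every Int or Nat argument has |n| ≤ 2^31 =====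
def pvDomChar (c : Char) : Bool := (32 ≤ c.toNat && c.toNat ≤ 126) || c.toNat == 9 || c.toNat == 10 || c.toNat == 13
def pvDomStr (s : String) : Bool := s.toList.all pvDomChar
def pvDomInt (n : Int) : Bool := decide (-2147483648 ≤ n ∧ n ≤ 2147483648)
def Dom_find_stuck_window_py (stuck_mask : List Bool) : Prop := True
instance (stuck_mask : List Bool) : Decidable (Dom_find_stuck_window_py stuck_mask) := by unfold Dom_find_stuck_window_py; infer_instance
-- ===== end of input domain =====

-- B collects all maximal True-runs first and then selects the first longest with max(key=length),
-- instead of A's single scan interleaving run tracking with best-so-far bookkeeping (alternative decomposition, same cost).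

-- ===== PORT A =====
-- A's loop over enumerate(stuck_mask) with state (best_start, best_end, best_len, current_start, current_len).
def goA_find_stuck (bs be : Option Int) (bl : Int) (cs : Option Int) (cl : Int) (i : Int) :
    List Bool → Option Int × Option Int
  | [] => (bs, be)
  | v :: rest =>
    if v then
      let cs' : Option Int := match cs with | none => some i | some s => some s
      let cl' := cl + 1
      if cl' > bl then goA_find_stuck cs' (some i) cl' cs' cl' (i + 1) rest
      else goA_find_stuck bs be bl cs' cl' (i + 1) rest
    else goA_find_stuck bs be bl none 0 (i + 1) rest

def find_stuck_window_py (stuck_mask : List Bool) : Option Int × Option Int :=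
  goA_find_stuck none none 0 none 0 0 stuck_mask

-- ===== PORT B =====
-- Phase 1 of B: the run-collecting loop (emits a run when it ends; the [] case is the post-loop flush,
-- where i - 1 = len(stuck_mask) - 1).
def collectRuns (start : Option Int) (i : Int) : List Bool → List (Int × Int)
  | [] => (match start with | some s => [(s, i - 1)] | none => [])
  | v :: rest =>
    if v then
      collectRuns (match start with | none => some i | some s => some s) (i + 1) rest
    else
      (match start with | some s => [(s, i - 1)] | none => []) ++ collectRuns none (i + 1) rest

-- Phase 2 of B: max(runs, key=lambda r: r[1]-r[0]) — Python's max keeps the FIRST maximal element,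
-- i.e. replaces only on strictly greater key.
def pickMaxRun (best : Int × Int) : List (Int × Int) → Int × Int
  | [] => best
  | r :: rest =>
    if r.2 - r.1 > best.2 - best.1 then pickMaxRun r rest else pickMaxRun best rest

def find_stuck_window_py_alt (stuck_mask : List Bool) : Option Int × Option Int :=
  match collectRuns none 0 stuck_mask with
  | [] => (none, none)
  | r :: rest => let b := pickMaxRun r rest; (some b.1, some b.2)

-- ===== PRECONDITION & SPEC =====
def Spec_find_stuck_window_py (stuck_mask : List Bool) (out : Option Int × Option Int) : Prop := out = find_stuck_window_py_alt stuck_mask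
instance (stuck_mask : List Bool) (out : Option Int × Option Int) : Decidable (Spec_find_stuck_window_py stuck_mask out) := by unfold Spec_find_stuck_window_py; infer_instance

-- ===== CLAIM (what is proved, stated in full; the proofs are below) =====
def Claim_equal_find_stuck_window_py : Prop := ∀ (stuck_mask : List Bool), Dom_find_stuck_window_py stuck_mask → Spec_find_stuck_window_py stuck_mask (find_stuck_window_py stuck_mask)

-- ===== LEMMAS AND PROOFS =====

-- Proof-side selector over a run list, carrying A's best-state (bs, be, bl).
def pickRun (bs be : Option Int) (bl : Int) : List (Int × Int) → Option Int × Option Int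
  | [] => (bs, be)
  | (s, e) :: rest =>
    if e - s + 1 > bl then pickRun (some s) (some e) (e - s + 1) rest
    else pickRun bs be bl rest

-- The run list started at `some s, i` begins with a run (s, e), e ≥ i - 1.
theorem collectRuns_some (mask : List Bool) : ∀ (s i : Int),
    ∃ e tail, collectRuns (some s) i mask = (s, e) :: tail ∧ i - 1 ≤ e := by
  induction mask with
  | nil => intro s i; exact ⟨i - 1, [], rfl, le_refl _⟩
  | cons v rest ih =>
    intro s i
    by_cases hv : v = true
    · obtain ⟨e, tail, heq, hle⟩ := ih s (i + 1)
      exact ⟨e, tail, by simp [collectRuns, hv, heq], by omega⟩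
    · simp at hv
      exact ⟨i - 1, collectRuns none (i + 1) rest, by simp [collectRuns, hv], le_refl _⟩

-- One true-step of A's scan, with the current run already normalised to (some s, cl = i - s).
theorem goA_true_step (rest : List Bool)
    (ih : ∀ (bs be : Option Int) (bl : Int) (cs : Option Int) (cl i : Int),
      0 ≤ cl → cl ≤ bl → (cs = none → cl = 0) → (∀ s, cs = some s → cl = i - s) →
      goA_find_stuck bs be bl cs cl i rest = pickRun bs be bl (collectRuns cs i rest))
    (bs be : Option Int) (bl s i cl : Int)
    (hcl : cl = i - s) (h0 : 0 ≤ cl) (hle : cl ≤ bl) :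
    (if cl + 1 > bl then goA_find_stuck (some s) (some i) (cl + 1) (some s) (cl + 1) (i + 1) rest
     else goA_find_stuck bs be bl (some s) (cl + 1) (i + 1) rest)
      = pickRun bs be bl (collectRuns (some s) (i + 1) rest) := by
  obtain ⟨e, tail, heq, hege⟩ := collectRuns_some rest s (i + 1)
  by_cases hgt : cl + 1 > bl
  · rw [if_pos hgt,
      ih (some s) (some i) (cl + 1) (some s) (cl + 1) (i + 1)
        (by omega) (le_refl _) (by simp) (by intro s' hs'; injection hs' with h; omega),
      heq]
    by_cases he : e - s + 1 > cl + 1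
    · have h2 : e - s + 1 > bl := by omega
      simp [pickRun, he, h2]
    · have h2 : e - s + 1 > bl := by omega
      have heeq : cl + 1 = e - s + 1 := by omega
      have hie : i = e := by omega
      rw [heeq, hie]
      simp [pickRun, h2]
  · rw [if_neg hgt,
      ih bs be bl (some s) (cl + 1) (i + 1)
        (by omega) (by omega) (by simp) (by intro s' hs'; injection hs' with h; omega),
      heq, pickRun]

-- Main invariant: A's scan equals pickRun over the remaining run list.
theorem goA_eq_pickRun (mask : List Bool) :
    ∀ (bs be : Option Int) (bl : Int) (cs : Option Int) (cl i : Int),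
    0 ≤ cl → cl ≤ bl →
    (cs = none → cl = 0) → (∀ s, cs = some s → cl = i - s) →
    goA_find_stuck bs be bl cs cl i mask = pickRun bs be bl (collectRuns cs i mask) := by
  induction mask with
  | nil =>
    intro bs be bl cs cl i h0 hle hnone hsome
    cases cs with
    | none => simp [goA_find_stuck, collectRuns, pickRun]
    | some s =>
      have hcl := hsome s rfl
      have : ¬ (i - 1 - s + 1 > bl) := by omega
      simp [goA_find_stuck, collectRuns, pickRun, this]
  | cons v rest ih =>
    intro bs be bl cs cl i h0 hle hnone hsome
    by_cases hv : v = true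
    · cases cs with
      | none =>
        have hcl0 := hnone rfl
        simp only [goA_find_stuck, collectRuns, hv, if_true]
        exact goA_true_step rest ih bs be bl i i cl (by omega) h0 hle
      | some s =>
        have hcl := hsome s rfl
        simp only [goA_find_stuck, collectRuns, hv, if_true]
        exact goA_true_step rest ih bs be bl s i cl hcl h0 hle
    · simp at hv
      have lhs := ih bs be bl none 0 (i + 1) (le_refl _) (by omega) (fun _ => rfl)
        (by intro s hs; cases hs)
      simp only [goA_find_stuck, hv]
      rw [lhs]
      cases cs with
      | none => simp [collectRuns]
      | some s =>
        have hcl := hsome s rfl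
        have hng : ¬ (i - 1 - s + 1 > bl) := by omega
        simp [collectRuns, pickRun, hng]

-- pickRun seeded with a run equals B's pickMaxRun (wrapped in somes).
theorem pickRun_eq_pickMax (rest : List (Int × Int)) : ∀ (s e : Int),
    pickRun (some s) (some e) (e - s + 1) rest =
      ((pickMaxRun (s, e) rest).1, some (pickMaxRun (s, e) rest).2).map some id := by
  induction rest with
  | nil => intro s e; simp [pickRun, pickMaxRun]
  | cons r tail ih =>
    intro s e
    obtain ⟨s', e'⟩ := r
    by_cases h : e' - s' + 1 > e - s + 1
    · have h2 : e' - s' > e - s := by omega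
      simp [pickRun, pickMaxRun, h, h2, ih]
    · have h2 : ¬ (e' - s' > e - s) := by omega
      simp [pickRun, pickMaxRun, h, h2, ih]

-- A run list built from a cold start is empty or begins with a genuine run (e ≥ s).
theorem collectRuns_none_first (mask : List Bool) : ∀ (i s e : Int) (tail : List (Int × Int)),
    collectRuns none i mask = (s, e) :: tail → s ≤ e := by
  induction mask with
  | nil => intro i s e tail h; simp [collectRuns] at h
  | cons v rest ih =>
    intro i s e tail h
    by_cases hv : v = true
    · obtain ⟨e', tail', heq, hge⟩ := collectRuns_some rest i (i + 1)
      rw [collectRuns] at h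
      simp [hv] at h
      rw [heq] at h
      injection h with h1 h2
      injection h1 with hs he
      omega
    · simp at hv
      rw [collectRuns] at h
      simp [hv] at h
      exact ih (i + 1) s e tail h

-- ===== VERDICT (by name: the statement is the Claim_ definition above) =====
theorem find_stuck_window_py_spec : Claim_equal_find_stuck_window_py := by
  intro mask _
  unfold Spec_find_stuck_window_py find_stuck_window_py find_stuck_window_py_alt
  rw [goA_eq_pickRun mask none none 0 none 0 0 (le_refl _) (le_refl _) (fun _ => rfl)
    (by intro s hs; cases hs)]
  cases hruns : collectRuns none 0 mask with
  | nil => simp [pickRun]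
  | cons r tail =>
    obtain ⟨s, e⟩ := r
    have hse : s ≤ e := collectRuns_none_first mask 0 s e tail hruns
    have hgt : e - s + 1 > 0 := by omega
    simp [pickRun, hgt]
    have := pickRun_eq_pickMax tail s e
    simp at this
    rw [this]
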